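-- pv_equiv track=rewrite | github.com/daniel-reich/ubiquitous-fiesta | ke4FSMdG2XYxbGQny_19.py | even_odd_transform
-- ===== SOURCE A (Python) =====
-- def even_odd_transform(lst, n):
--   for k in range(0,n):
--     for i in range(0, len(lst)):
--         if lst[i] % 2 == 0:
--           lst[i]-=2
--         else:
--           lst[i]+=2
--   return lst
-- ===== SOURCE B (Python) =====
-- def even_odd_transform(lst, n):
--     # Parity is invariant under +-2, so n passes collapse to one closed-form shift.
--     m = max(n, 0)
--     return [x - 2 * m if x % 2 == 0 else x + 2 * m for x in lst]
-- ===== Notes on version B (the rewrite author's own statement) =====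
-- stated objective: faster
-- what changed: Replaces the n-times in-place sweep with a single map that adds/subtracts 2*max(n,0) in one pass, using that parity is invariant under +-2.
import Mathlib
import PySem

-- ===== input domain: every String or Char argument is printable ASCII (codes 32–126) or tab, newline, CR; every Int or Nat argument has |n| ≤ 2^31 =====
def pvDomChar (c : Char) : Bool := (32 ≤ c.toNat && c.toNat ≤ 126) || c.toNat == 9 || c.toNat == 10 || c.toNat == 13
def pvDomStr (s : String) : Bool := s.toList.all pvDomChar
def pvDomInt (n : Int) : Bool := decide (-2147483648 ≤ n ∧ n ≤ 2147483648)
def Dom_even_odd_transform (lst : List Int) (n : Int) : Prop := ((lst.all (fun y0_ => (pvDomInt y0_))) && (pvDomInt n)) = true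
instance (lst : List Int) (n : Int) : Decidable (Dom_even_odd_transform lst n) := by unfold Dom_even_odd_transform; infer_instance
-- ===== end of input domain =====

-- B replaces A's n in-place sweeps by one closed-form pass (parity invariant under ±2);
-- A mutates lst in place in Python, so the equivalence proved here is about the RETURN value only.

-- ===== PORT A =====
-- inner-loop body: lst[i] -= 2 / += 2 depending on lst[i] % 2 (index always in range;
-- the none branch of getElem? is unreachable for i < length)
def eotInner (a : List Int) (i : Nat) : List Int :=
  match a[i]? with
  | some v => a.set i (if PySem.Int.mod v 2 = 0 then v - 2 else v + 2)
  | none => a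

-- range(0,n) runs n.toNat times (empty for n ≤ 0, exactly Python); range(0,len(lst))
-- ported as List.range over Nat indices, exact since len ≥ 0.
def even_odd_transform (lst : List Int) (n : Int) : List Int :=
  (List.range n.toNat).foldl
    (fun acc _ => (List.range acc.length).foldl eotInner acc) lst

-- ===== PORT B =====
def even_odd_transform_alt (lst : List Int) (n : Int) : List Int :=
  let m := max n 0
  lst.map (fun x => if PySem.Int.mod x 2 = 0 then x - 2 * m else x + 2 * m)

-- ===== PRECONDITION & SPEC =====
def Spec_even_odd_transform (lst : List Int) (n : Int) (out : List Int) : Prop := out = even_odd_transform_alt lst n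
instance (lst : List Int) (n : Int) (out : List Int) : Decidable (Spec_even_odd_transform lst n out) := by unfold Spec_even_odd_transform; infer_instance

-- ===== CLAIM (what is proved, stated in full; the proofs are below) =====
def Claim_equal_even_odd_transform : Prop := ∀ (lst : List Int) (n : Int), Dom_even_odd_transform lst n → Spec_even_odd_transform lst n (even_odd_transform lst n)

-- ===== LEMMAS AND PROOFS =====

def eotF (v : Int) : Int := if PySem.Int.mod v 2 = 0 then v - 2 else v + 2

def eotG (k : Nat) (x : Int) : Int :=
  if PySem.Int.mod x 2 = 0 then x - 2 * k else x + 2 * k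

theorem pysem_mod_two (a : Int) : PySem.Int.mod a 2 = a % 2 :=
  PySem.Int.mod_eq_emod_of_pos (by norm_num)

theorem eotInner_cons_succ (y : Int) (t : List Int) (i : Nat) :
    eotInner (y :: t) (i + 1) = y :: eotInner t i := by
  unfold eotInner
  cases h : t[i]? <;> simp [h]

theorem foldl_eotInner_succ (r : List Nat) :
    ∀ (y : Int) (t : List Int),
      r.foldl (fun a i => eotInner a (i + 1)) (y :: t) = y :: r.foldl eotInner t := by
  induction r with
  | nil => intro y t; simp
  | cons i rs ih =>
      intro y t
      simp only [List.foldl_cons, eotInner_cons_succ, ih]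

theorem pass_eq (a : List Int) :
    (List.range a.length).foldl eotInner a = a.map eotF := by
  induction a with
  | nil => simp
  | cons x xs ih =>
      have h0 : eotInner (x :: xs) 0 = eotF x :: xs := by
        simp [eotInner, eotF]
      calc (List.range (x :: xs).length).foldl eotInner (x :: xs)
          = ((List.range xs.length).map Nat.succ).foldl eotInner (eotF x :: xs) := by
            rw [List.length_cons, List.range_succ_eq_map, List.foldl_cons, h0]
        _ = (List.range xs.length).foldl (fun a i => eotInner a (i + 1)) (eotF x :: xs) := by
            rw [List.foldl_map]
        _ = eotF x :: (List.range xs.length).foldl eotInner xs :=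
            foldl_eotInner_succ _ _ _
        _ = (x :: xs).map eotF := by rw [ih]; rfl

theorem eotF_eotG (k : Nat) (x : Int) : eotF (eotG k x) = eotG (k + 1) x := by
  simp only [eotF, eotG, pysem_mod_two]
  split_ifs <;> push_cast at * <;> omega

theorem iter_eq (k : Nat) (lst : List Int) :
    (List.range k).foldl (fun acc _ => (List.range acc.length).foldl eotInner acc) lst
      = lst.map (eotG k) := by
  induction k with
  | zero =>
      simp only [List.range_zero, List.foldl_nil]
      rw [List.map_congr_left (g := id) (fun x _ => by simp [eotG, id]), List.map_id]
  | succ k ih =>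
      rw [List.range_succ, List.foldl_append, ih, List.foldl_cons, List.foldl_nil,
        pass_eq, List.map_map]
      exact List.map_congr_left (fun x _ => eotF_eotG k x)

-- ===== VERDICT (by name: the statement is the Claim_ definition above) =====
theorem even_odd_transform_spec : Claim_equal_even_odd_transform := by
  intro lst n _
  unfold Spec_even_odd_transform even_odd_transform even_odd_transform_alt
  rw [iter_eq]
  exact List.map_congr_left (fun x _ => by
    simp only [eotG, Int.toNat_eq_max])
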